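-- pv_equiv track=rewrite | github.com/LordBrom/programming-challenges | adventofcode/y2015/day15.py | checkIngVals
-- ===== SOURCE A (Python) =====
-- def checkIngVals(ingVals, checkCalaries=False):
--     result = 1
--
--     for i in range(4):
--         next = 0
--         for ingVal in ingVals:
--             next += ingVal[i]
--         result *= max(next, 0)
--
--     if checkCalaries:
--         cals = 0
--         for ingVal in ingVals:
--             cals += ingVal[4]
--         if cals != 500:
--             return 0
--     return result
-- ===== SOURCE B (Python) =====
-- def checkIngVals(ingVals, checkCalaries=False):
--     t0 = t1 = t2 = t3 = 0
--     for v in ingVals: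
--         t0 += v[0]
--         t1 += v[1]
--         t2 += v[2]
--         t3 += v[3]
--     result = max(t0, 0) * max(t1, 0) * max(t2, 0) * max(t3, 0)
--     if checkCalaries and sum(v[4] for v in ingVals) != 500:
--         return 0
--     return result
-- ===== Notes on version B (the rewrite author's own statement) =====
-- stated objective: alternative
-- what changed: B makes a single pass over ingVals maintaining four scalar sum accumulators at once, then multiplies the clamped sums, instead of A's four separate scans (one per property index) each followed by a multiply.
import Mathlib
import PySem

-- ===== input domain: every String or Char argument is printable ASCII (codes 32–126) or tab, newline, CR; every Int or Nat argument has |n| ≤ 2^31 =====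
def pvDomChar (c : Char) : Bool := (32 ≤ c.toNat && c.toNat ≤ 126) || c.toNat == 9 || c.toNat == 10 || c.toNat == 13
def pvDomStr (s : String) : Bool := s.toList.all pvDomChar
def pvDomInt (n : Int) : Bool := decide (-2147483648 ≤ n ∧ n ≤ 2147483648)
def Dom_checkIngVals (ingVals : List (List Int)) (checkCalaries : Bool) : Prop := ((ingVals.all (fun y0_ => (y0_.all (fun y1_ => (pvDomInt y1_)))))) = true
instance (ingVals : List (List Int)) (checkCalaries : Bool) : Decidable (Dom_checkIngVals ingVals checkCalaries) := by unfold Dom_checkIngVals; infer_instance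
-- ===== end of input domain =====

-- ===== PORT A =====
-- B makes a single pass over ingVals with four scalar accumulators instead of A's
-- four separate per-index scans; same cost class, different traversal (objective: alternative).
def checkIngVals (ingVals : List (List Int)) (checkCalaries : Bool) : Int :=
  let result := (PySem.List.pyRange 0 4 1).foldl (fun result i =>
    let next := ingVals.foldl (fun next ingVal => next + (PySem.List.pyGet? ingVal i).getD 0) 0
    result * max next 0) 1
  if checkCalaries then
    let cals := ingVals.foldl (fun cals ingVal => cals + (PySem.List.pyGet? ingVal 4).getD 0) 0
    if cals ≠ 500 then 0 else result
  else result

-- ===== PORT B =====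
def checkIngVals_alt (ingVals : List (List Int)) (checkCalaries : Bool) : Int :=
  let ts := ingVals.foldl (fun (t : Int × Int × Int × Int) v =>
      (t.1 + (PySem.List.pyGet? v 0).getD 0,
       t.2.1 + (PySem.List.pyGet? v 1).getD 0,
       t.2.2.1 + (PySem.List.pyGet? v 2).getD 0,
       t.2.2.2 + (PySem.List.pyGet? v 3).getD 0)) (0, 0, 0, 0)
  let result := max ts.1 0 * max ts.2.1 0 * max ts.2.2.1 0 * max ts.2.2.2 0
  if checkCalaries && decide (ingVals.foldl (fun c v => c + (PySem.List.pyGet? v 4).getD 0) 0 ≠ 500) then 0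
  else result

-- ===== PRECONDITION & SPEC =====
-- Pre_ excludes exactly the inputs on which Python A raises IndexError:
-- a row shorter than 4, or (with checkCalaries) shorter than 5.
def Pre_checkIngVals (ingVals : List (List Int)) (checkCalaries : Bool) : Prop :=
  ∀ v ∈ ingVals, 4 ≤ v.length ∧ (checkCalaries = true → 5 ≤ v.length)
instance (ingVals : List (List Int)) (checkCalaries : Bool) : Decidable (Pre_checkIngVals ingVals checkCalaries) := by unfold Pre_checkIngVals; infer_instance
def pvWitness_checkIngVals : List (List Int) × Bool := ([[1, 2, 3, 4, 500]], true)
def Spec_checkIngVals (ingVals : List (List Int)) (checkCalaries : Bool) (out : Int) : Prop := out = checkIngVals_alt ingVals checkCalaries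
instance (ingVals : List (List Int)) (checkCalaries : Bool) (out : Int) : Decidable (Spec_checkIngVals ingVals checkCalaries out) := by unfold Spec_checkIngVals; infer_instance

-- ===== CLAIM (what is proved, stated in full; the proofs are below) =====
def Claim_equal_checkIngVals : Prop := ∀ (ingVals : List (List Int)) (checkCalaries : Bool), Dom_checkIngVals ingVals checkCalaries → Pre_checkIngVals ingVals checkCalaries → Spec_checkIngVals ingVals checkCalaries (checkIngVals ingVals checkCalaries)

-- ===== LEMMAS AND PROOFS =====

-- the single-pass tuple fold of B computes the four per-index sums of A's scans
theorem fold4_eq (ingVals : List (List Int)) (a b c d : Int) :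
    ingVals.foldl (fun (t : Int × Int × Int × Int) v =>
      (t.1 + (PySem.List.pyGet? v 0).getD 0,
       t.2.1 + (PySem.List.pyGet? v 1).getD 0,
       t.2.2.1 + (PySem.List.pyGet? v 2).getD 0,
       t.2.2.2 + (PySem.List.pyGet? v 3).getD 0)) (a, b, c, d)
    = (ingVals.foldl (fun n v => n + (PySem.List.pyGet? v 0).getD 0) a,
       ingVals.foldl (fun n v => n + (PySem.List.pyGet? v 1).getD 0) b,
       ingVals.foldl (fun n v => n + (PySem.List.pyGet? v 2).getD 0) c,
       ingVals.foldl (fun n v => n + (PySem.List.pyGet? v 3).getD 0) d) := by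
  induction ingVals generalizing a b c d with
  | nil => rfl
  | cons v l ih => simp [List.foldl, ih]

-- ===== VERDICT (by name: the statement is the Claim_ definition above) =====
theorem checkIngVals_spec : Claim_equal_checkIngVals := by
  intro ingVals checkCalaries _ _
  unfold Spec_checkIngVals checkIngVals checkIngVals_alt
  rw [fold4_eq]
  have hr : PySem.List.pyRange 0 4 1 = [0, 1, 2, 3] := by decide
  rw [hr]
  cases checkCalaries
  · simp only [Bool.false_and, if_neg Bool.false_ne_true, List.foldl]
    ring
  · rw [if_pos rfl]
    simp only [Bool.true_and, decide_eq_true_eq]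
    split_ifs with h1
    · rfl
    · simp only [List.foldl]
      ring
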